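-- pv_equiv track=rewrite | github.com/jrmmy/Investigating_Selection_on_SarsCov2_Secondary_Structure | MultiGeneRemovalScript.py | count_undef
-- ===== SOURCE A (Python) =====
-- def count_undef(seq):
--     i = 0
--     x = 0
--     for i in range(len(seq)):
--         base = seq[i]
--         if base == 'A' or base == 'T' or  base == 'C' or base == 'G':
--             pass
--         else:
--             x += 1
--     return x
-- ===== SOURCE B (Python) =====
-- def count_undef(seq):
--     counts = {}
--     for base in seq:
--         counts[base] = counts.get(base, 0) + 1
--     return len(seq) - sum(counts.get(c, 0) for c in 'ACGT')
-- ===== Notes on version B (the rewrite author's own statement) =====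
-- stated objective: alternative
-- what changed: B builds a frequency table of the whole sequence in one pass and returns len(seq) minus the summed counts of the four valid bases, instead of A's per-character branch accumulating an invalid counter.
import Mathlib
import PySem

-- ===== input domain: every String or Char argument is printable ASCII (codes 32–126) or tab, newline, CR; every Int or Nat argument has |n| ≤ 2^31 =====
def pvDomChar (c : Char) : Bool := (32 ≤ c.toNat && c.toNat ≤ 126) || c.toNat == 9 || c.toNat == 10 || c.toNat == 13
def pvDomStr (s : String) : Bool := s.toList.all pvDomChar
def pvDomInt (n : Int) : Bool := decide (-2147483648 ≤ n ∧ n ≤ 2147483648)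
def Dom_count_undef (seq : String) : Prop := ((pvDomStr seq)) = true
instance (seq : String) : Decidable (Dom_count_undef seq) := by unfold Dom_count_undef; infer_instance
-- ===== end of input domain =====

-- B replaces A's per-character invalid-counter branch by a one-pass frequency table
-- and the arithmetic complement len(seq) - (#A + #C + #G + #T); same O(n) cost.

-- ===== PORT A =====
-- for i in range(len(seq)): base = seq[i]; count the non-ACGT bases
def count_undef (seq : String) : Int :=
  (PySem.List.pyRange 0 (PySem.List.len seq.toList) 1).foldl
    (fun x i =>
      let base := PySem.List.pyGetD seq.toList i ' '
      if base = 'A' ∨ base = 'T' ∨ base = 'C' ∨ base = 'G' then x else x + 1) 0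

-- ===== PORT B =====
-- one-pass frequency table, then len(seq) minus the counts of the four valid bases
def count_undef_alt (seq : String) : Int :=
  let counts : PySem.Dict Char Int :=
    seq.toList.foldl (fun d b => d.insert b (d.getD b 0 + 1)) PySem.Dict.empty
  (seq.toList.length : Int) - (['A', 'C', 'G', 'T'].foldl (fun s c => s + counts.getD c 0) 0)

-- ===== PRECONDITION & SPEC =====
def Spec_count_undef (seq : String) (out : Int) : Prop := out = count_undef_alt seq
instance (seq : String) (out : Int) : Decidable (Spec_count_undef seq out) := by unfold Spec_count_undef; infer_instance

-- ===== CLAIM (what is proved, stated in full; the proofs are below) =====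
def Claim_equal_count_undef : Prop := ∀ (seq : String), Dom_count_undef seq → Spec_count_undef seq (count_undef seq)

-- ===== LEMMAS AND PROOFS =====
theorem count_undef_foldl (l : List Char) (x : Int) :
    l.foldl (fun x b => if b = 'A' ∨ b = 'T' ∨ b = 'C' ∨ b = 'G' then x else x + 1) x
      = x + (l.length : Int)
        - ((l.count 'A' : Int) + (l.count 'C' : Int) + (l.count 'G' : Int) + (l.count 'T' : Int)) := by
  induction l generalizing x with
  | nil => simp
  | cons b t ih =>
    simp only [List.foldl_cons, List.count_cons, ih]
    by_cases hA : b = 'A' <;> by_cases hT : b = 'T' <;> by_cases hC : b = 'C' <;>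
      by_cases hG : b = 'G' <;> simp_all <;> omega

theorem count_undef_spec' (seq : String) : count_undef seq = count_undef_alt seq := by
  unfold count_undef count_undef_alt
  rw [PySem.Dict.foldl_insert_getD_add_one_eq_counter]
  simp only [PySem.List.len_eq]
  rw [show (fun (x : Int) (i : Int) =>
        have base := PySem.List.pyGetD seq.toList i ' '
        if base = 'A' ∨ base = 'T' ∨ base = 'C' ∨ base = 'G' then x else x + 1)
      = (fun (x : Int) (i : Int) =>
        (fun (x : Int) (b : Char) => if b = 'A' ∨ b = 'T' ∨ b = 'C' ∨ b = 'G' then x else x + 1)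
          x (PySem.List.pyGetD seq.toList i ' ')) from rfl]
  rw [PySem.List.foldl_pyRange_zero_pyGetD' seq.toList ' '
        (fun x b => if b = 'A' ∨ b = 'T' ∨ b = 'C' ∨ b = 'G' then x else x + 1) 0]
  rw [count_undef_foldl]
  simp [List.foldl, PySem.Dict.getD_counter]

-- ===== VERDICT (by name: the statement is the Claim_ definition above) =====
theorem count_undef_spec : Claim_equal_count_undef := by
  intro seq _
  unfold Spec_count_undef
  exact count_undef_spec' seq
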